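-- pv_equiv track=rewrite | github.com/neurodie/neurodie.github.io | scrape_single_episode_all.py | obfuscate_once
-- ===== SOURCE A (Python) =====
-- OBF_KEY = "849959193z"
--
-- def obfuscate_once(text: str) -> str:
--     charset = []
--     index_map = []
--     for ch in text:
--         if ch not in charset:
--             charset.append(ch)
--         index_map.append(f"{charset.index(ch):02d}")
--     return "".join(index_map) + OBF_KEY + "".join(charset)
-- ===== SOURCE B (Python) =====
-- OBF_KEY = "849959193z"
--
-- def obfuscate_once(text: str) -> str:
--     positions = {}
--     for i, ch in enumerate(text):
--         positions.setdefault(ch, []).append(i)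
--     out = [""] * len(text)
--     for idx, locs in enumerate(positions.values()):
--         code = "%02d" % idx
--         for p in locs:
--             out[p] = code
--     return "".join(out) + OBF_KEY + "".join(positions)
-- ===== Notes on version B (the rewrite author's own statement) =====
-- stated objective: faster
-- what changed: Replaces A's single interleaved loop (grow charset, rescan it with charset.index per character) with an inverted-index scheme: one grouping pass builds char -> list of positions, then each distinct character's code is scattered into a preallocated output array.
import Mathlib
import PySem

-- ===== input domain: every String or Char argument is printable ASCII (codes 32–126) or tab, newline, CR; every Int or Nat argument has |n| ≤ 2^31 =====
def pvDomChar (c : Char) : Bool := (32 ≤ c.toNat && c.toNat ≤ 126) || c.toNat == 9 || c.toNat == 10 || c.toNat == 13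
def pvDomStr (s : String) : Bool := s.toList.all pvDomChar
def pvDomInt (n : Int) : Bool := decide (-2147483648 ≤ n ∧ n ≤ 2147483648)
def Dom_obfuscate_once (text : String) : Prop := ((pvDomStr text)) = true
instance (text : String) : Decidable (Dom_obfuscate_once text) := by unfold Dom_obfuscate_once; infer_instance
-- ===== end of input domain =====

-- B replaces A's interleaved grow-and-rescan loop with an inverted index: group positions by
-- character, then scatter each character's code into a preallocated output array (O(n) vs O(n·k); measured faster).

-- f"{n:02d}" / "%02d" % n ported by hand: pad str(n) with one leading '0' if shorter than 2 chars
-- (exact for every int: Python zero-pads the decimal form of the value to width 2).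
def pvFmt02 (n : Int) : List Char :=
  let s := (PySem.Int.toStr n).toList
  if s.length < 2 then '0' :: s else s

def pvObfKey : List Char := "849959193z".toList

-- ===== PORT A =====
def obfuscate_once (text : String) : String :=
  let st := text.toList.foldl
    (fun (st : List Char × List (List Char)) ch =>
      let charset := if ch ∈ st.1 then st.1 else st.1 ++ [ch]
      -- charset.index(ch): ch was just ensured present, so the ValueError branch (none) never
      -- fires; getD 0 is the total form of that always-successful lookup
      (charset, st.2 ++ [pvFmt02 (((PySem.List.index? charset ch).getD 0 : Nat) : Int)]))
    ([], [])
  String.ofList (st.2.flatten ++ pvObfKey ++ st.1)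

-- ===== PORT B =====
def obfuscate_once_alt (text : String) : String :=
  let cs := text.toList
  -- positions.setdefault(ch, []).append(i) == d[ch] = d.get(ch, []) + [i] == Dict.modify
  let positions : PySem.Dict Char (List Int) :=
    (PySem.List.enumerate cs 0).foldl (fun d p => d.modify p.2 [] (· ++ [p.1])) PySem.Dict.empty
  let out0 : List (List Char) := List.replicate cs.length []
  -- out[p] = code: p is always a valid nonnegative index here, so pySetD is the total form
  let out := (PySem.List.enumerate positions.values 0).foldl
    (fun o q => q.2.foldl (fun o p => PySem.List.pySetD o p (pvFmt02 q.1)) o) out0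
  String.ofList (out.flatten ++ pvObfKey ++ positions.keys)

-- ===== PRECONDITION & SPEC =====
def Spec_obfuscate_once (text : String) (out : String) : Prop := out = obfuscate_once_alt text
instance (text : String) (out : String) : Decidable (Spec_obfuscate_once text out) := by unfold Spec_obfuscate_once; infer_instance

-- ===== CLAIM =====
def Claim_equal_obfuscate_once : Prop := ∀ (text : String), Dom_obfuscate_once text → Spec_obfuscate_once text (obfuscate_once text)

-- ===== LEMMAS AND PROOFS =====

-- ---- A side: the emitted index string is each character's index in the final dedup'd charset ----

def pvStepC (c : List Char) (ch : Char) : List Char := if ch ∈ c then c else c ++ [ch]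

lemma pvStepC_mem (c : List Char) (x ch : Char) (h : ch ∈ c) : ch ∈ pvStepC c x := by
  unfold pvStepC; split <;> simp [h]

lemma pvAccC_eq_dedup (l : List Char) : l.foldl pvStepC [] = PySem.List.dedup l := by
  simp only [PySem.List.dedup, PySem.Set.ofList]
  congr 1; funext c ch; simp [pvStepC, PySem.Set.add]

lemma pvIdx_stable (l : List Char) : ∀ (c : List Char) (ch : Char), ch ∈ c →
    PySem.List.index? (l.foldl pvStepC c) ch = PySem.List.index? c ch := by
  induction l with
  | nil => intro c ch _; rfl
  | cons x l ih =>
    intro c ch h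
    simp only [List.foldl_cons]
    rw [ih (pvStepC c x) ch (pvStepC_mem c x ch h)]
    unfold pvStepC; split
    · rfl
    · exact PySem.List.index?_append_of_mem [x] h

lemma pvFoldA_fst (l : List Char) : ∀ (c : List Char) (m : List (List Char)),
    (l.foldl (fun (st : List Char × List (List Char)) ch =>
      let charset := if ch ∈ st.1 then st.1 else st.1 ++ [ch]
      (charset, st.2 ++ [pvFmt02 (((PySem.List.index? charset ch).getD 0 : Nat) : Int)])) (c, m)).1
    = l.foldl pvStepC c := by
  induction l with
  | nil => intro c m; rfl
  | cons x l ih => intro c m; simp only [List.foldl_cons]; exact ih _ _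

lemma pvFoldA_snd (l : List Char) : ∀ (c : List Char) (m : List (List Char)),
    (l.foldl (fun (st : List Char × List (List Char)) ch =>
      let charset := if ch ∈ st.1 then st.1 else st.1 ++ [ch]
      (charset, st.2 ++ [pvFmt02 (((PySem.List.index? charset ch).getD 0 : Nat) : Int)])) (c, m)).2
    = m ++ l.map (fun ch => pvFmt02 (((PySem.List.index? (l.foldl pvStepC c) ch).getD 0 : Nat) : Int)) := by
  induction l with
  | nil => intro c m; simp
  | cons x l ih =>
    intro c m
    simp only [List.foldl_cons, List.map_cons]
    rw [ih]
    have hx : x ∈ pvStepC c x := by unfold pvStepC; split <;> simp_all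
    have : PySem.List.index? (l.foldl pvStepC (pvStepC c x)) x
         = PySem.List.index? (pvStepC c x) x := pvIdx_stable l (pvStepC c x) x hx
    simp only [pvStepC] at this ⊢
    rw [this, List.append_cons, List.append_assoc]
    simp

-- ---- B side: the grouping dict ----

def pvPositions (cs : List Char) : PySem.Dict Char (List Int) :=
  (PySem.List.enumerate cs 0).foldl (fun d p => d.modify p.2 [] (· ++ [p.1])) PySem.Dict.empty

lemma pvPositions_keys (cs : List Char) : (pvPositions cs).keys = PySem.List.dedup cs := by
  have h := PySem.Dict.keys_foldl_modify_key (PySem.List.enumerate cs 0)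
    (fun p => p.2) ([] : List Int) (fun _ p v => v ++ [p.1]) PySem.Dict.empty
  refine Eq.trans (a := (pvPositions cs).keys) h ?_
  simp [PySem.List.map_snd_enumerate, PySem.Set.update_nil_left]

lemma pvPositions_nodup (cs : List Char) : (pvPositions cs).keys.Nodup := by
  unfold pvPositions
  exact PySem.Dict.nodup_keys_foldl_modify_key _ _ _ _ _ PySem.Dict.nodup_keys_empty

lemma pvPositions_getD (cs : List Char) (ch : Char) :
    (pvPositions cs).getD ch []
    = (((PySem.List.enumerate cs 0).map Prod.swap).filter (fun p => p.1 == ch)).map (·.2) := by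
  unfold pvPositions
  rw [show (List.foldl (fun (d : PySem.Dict Char (List Int)) p => d.modify p.2 [] (· ++ [p.1]))
        PySem.Dict.empty (PySem.List.enumerate cs 0))
      = ((PySem.List.enumerate cs 0).map Prod.swap).foldl
          (fun d p => d.modify p.1 [] (· ++ [p.2])) PySem.Dict.empty
      from by rw [List.foldl_map]; rfl]
  rw [PySem.Dict.getD_foldl_modify_append]
  simp

lemma pvMem_getD (cs : List Char) (ch : Char) (k : Int) :
    k ∈ (pvPositions cs).getD ch [] ↔ ∃ (j : Nat) (_ : j < cs.length), k = (j : Int) ∧ cs[j] = ch := by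
  rw [pvPositions_getD]
  simp only [List.mem_map, List.mem_filter, PySem.List.mem_enumerate_iff]
  constructor
  · rintro ⟨p, ⟨⟨q, ⟨j, hj, rfl⟩, rfl⟩, hb⟩, rfl⟩
    exact ⟨j, hj, by simp, by simpa using (beq_iff_eq.mp hb)⟩
  · rintro ⟨j, hj, rfl, rfl⟩
    exact ⟨(cs[j], (j : Int)), ⟨⟨((j : Int), cs[j]), ⟨j, hj, by simp⟩, rfl⟩, by simp⟩, rfl⟩

-- ---- B side: the scatter loop ----

lemma pvInner_len (locs : List Int) (v : List Char) (o : List (List Char)) :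
    (locs.foldl (fun o p => PySem.List.pySetD o p v) o).length = o.length := by
  induction locs generalizing o with
  | nil => rfl
  | cons p locs ih => simp [List.foldl_cons, ih, PySem.List.length_pySetD]

lemma pvInner_get (locs : List Int) (v : List Char) (o : List (List Char)) (i : Nat)
    (hnn : ∀ p ∈ locs, 0 ≤ p) (hi : i < o.length) :
    (locs.foldl (fun o p => PySem.List.pySetD o p v) o)[i]?
    = if (i : Int) ∈ locs then some v else o[i]? := by
  induction locs generalizing o with
  | nil => simp
  | cons p locs ih =>
    simp only [List.foldl_cons]
    rw [ih _ (fun q hq => hnn q (List.mem_cons_of_mem _ hq))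
        (by rw [PySem.List.length_pySetD]; exact hi)]
    have hp0 : 0 ≤ p := hnn p List.mem_cons_self
    rw [PySem.List.pySetD_of_nonneg _ _ hp0]
    by_cases h1 : (i : Int) ∈ locs
    · simp [h1]
    · by_cases hpi : p = (i : Int)
      · have hpt : p.toNat = i := by omega
        rw [hpt, List.getElem?_set_self hi, if_pos (List.mem_cons.mpr (Or.inl hpi.symm)), ite_self]
      · have hne : p.toNat ≠ i := by omega
        have hni : (i : Int) ∉ p :: locs := by
          simp only [List.mem_cons, not_or]
          exact ⟨fun h => hpi h.symm, h1⟩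
        rw [List.getElem?_set_ne hne, if_neg h1, if_neg hni]

lemma pvOuter_len (L : List (Int × List Int)) (o : List (List Char)) :
    (L.foldl (fun o q => q.2.foldl (fun o p => PySem.List.pySetD o p (pvFmt02 q.1)) o) o).length
    = o.length := by
  induction L generalizing o with
  | nil => rfl
  | cons q L ih => simp only [List.foldl_cons]; rw [ih, pvInner_len]

lemma pvOuter_notmem (L : List (Int × List Int)) (o : List (List Char)) (i : Nat)
    (hi : i < o.length)
    (hnn : ∀ q ∈ L, ∀ p ∈ q.2, 0 ≤ p)
    (h : ∀ q ∈ L, (i : Int) ∉ q.2) :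
    (L.foldl (fun o q => q.2.foldl (fun o p => PySem.List.pySetD o p (pvFmt02 q.1)) o) o)[i]?
    = o[i]? := by
  induction L generalizing o with
  | nil => rfl
  | cons q L ih =>
    simp only [List.foldl_cons]
    rw [ih _ (by rw [pvInner_len]; exact hi)
        (fun q' h' => hnn q' (List.mem_cons_of_mem _ h'))
        (fun q' h' => h q' (List.mem_cons_of_mem _ h')),
      pvInner_get _ _ _ _ (hnn q List.mem_cons_self) hi,
      if_neg (h q List.mem_cons_self)]

lemma pvOuter_get (L : List (Int × List Int)) (o : List (List Char)) (i : Nat) (c : Int)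
    (hi : i < o.length)
    (hnn : ∀ q ∈ L, ∀ p ∈ q.2, 0 ≤ p)
    (huni : ∀ q ∈ L, (i : Int) ∈ q.2 → q.1 = c)
    (hex : ∃ q ∈ L, (i : Int) ∈ q.2) :
    (L.foldl (fun o q => q.2.foldl (fun o p => PySem.List.pySetD o p (pvFmt02 q.1)) o) o)[i]?
    = some (pvFmt02 c) := by
  induction L generalizing o with
  | nil => exact absurd hex (by simp)
  | cons q L ih =>
    simp only [List.foldl_cons]
    have hi' : i < (q.2.foldl (fun o p => PySem.List.pySetD o p (pvFmt02 q.1)) o).length := by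
      rw [pvInner_len]; exact hi
    by_cases hex2 : ∃ q' ∈ L, (i : Int) ∈ q'.2
    · exact ih _ hi' (fun q' h => hnn q' (List.mem_cons_of_mem _ h))
        (fun q' h => huni q' (List.mem_cons_of_mem _ h)) hex2
    · have hmem : (i : Int) ∈ q.2 := by
        rcases hex with ⟨q', hq', hm⟩
        rcases List.mem_cons.mp hq' with rfl | h
        · exact hm
        · exact absurd ⟨q', h, hm⟩ hex2
      rw [pvOuter_notmem _ _ _ hi' (fun q' h => hnn q' (List.mem_cons_of_mem _ h))
          (fun q' h hm => hex2 ⟨q', h, hm⟩),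
        pvInner_get _ _ _ _ (hnn q List.mem_cons_self) hi, if_pos hmem,
        huni q List.mem_cons_self hmem]

-- the final scatter array equals the direct per-character map
lemma pvOut_eq_map (cs : List Char) :
    (PySem.List.enumerate (pvPositions cs).values 0).foldl
      (fun o q => q.2.foldl (fun o p => PySem.List.pySetD o p (pvFmt02 q.1)) o)
      (List.replicate cs.length ([] : List Char))
    = cs.map (fun ch => pvFmt02 (((PySem.List.index? (PySem.List.dedup cs) ch).getD 0 : Nat) : Int)) := by
  have hvals : (pvPositions cs).values
      = (PySem.List.dedup cs).map (fun k => (pvPositions cs).getD k []) := by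
    rw [PySem.Dict.values_eq_map_keys _ (pvPositions_nodup cs) [], pvPositions_keys]
  have hL : ∀ q ∈ PySem.List.enumerate (pvPositions cs).values 0,
      ∃ (j : Nat) (_ : j < (PySem.List.dedup cs).length),
        q = ((j : Int), (pvPositions cs).getD (PySem.List.dedup cs)[j] []) := by
    intro q hq
    rw [hvals, PySem.List.mem_enumerate_iff] at hq
    obtain ⟨k, hk, rfl⟩ := hq
    simp only [List.length_map] at hk
    exact ⟨k, hk, by simp⟩
  apply List.ext_getElem?
  intro i
  by_cases hi : i < cs.length
  · have hmem : cs[i] ∈ PySem.List.dedup cs := (PySem.List.mem_dedup _ _).mpr (cs.getElem_mem hi)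
    obtain ⟨k, hk⟩ := Option.isSome_iff_exists.mp ((PySem.List.index?_isSome_iff _ _).mpr hmem)
    obtain ⟨hklt, hget, -⟩ := PySem.List.getElem_of_index?_eq_some hk
    rw [pvOuter_get _ _ i (k : Int) (by simpa using hi)
        (fun q hq p hp => by
          obtain ⟨j, hj, rfl⟩ := hL q hq
          simp only at hp
          rw [pvMem_getD] at hp
          obtain ⟨m, _, rfl, -⟩ := hp
          positivity)
        (fun q hq hmemq => by
          obtain ⟨j, hj, rfl⟩ := hL q hq
          simp only at hmemq ⊢
          rw [pvMem_getD] at hmemq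
          obtain ⟨m, hm, hmi, hcm⟩ := hmemq
          have hmj : m = i := by exact_mod_cast hmi.symm
          subst hmj
          have hjk : j = k := (List.Nodup.getElem_inj_iff (PySem.List.nodup_dedup cs)).mp
            (by rw [← hcm, hget])
          exact_mod_cast hjk)
        ⟨((k : Int), (pvPositions cs).getD (PySem.List.dedup cs)[k] []),
          by rw [hvals, PySem.List.mem_enumerate_iff]
             exact ⟨k, by simpa using hklt, by simp⟩,
          by simp only
             rw [pvMem_getD]
             exact ⟨i, hi, rfl, hget.symm⟩⟩,
      List.getElem?_map, List.getElem?_eq_getElem hi]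
    have hk' := hk
    simp only [PySem.List.index?_eq_idxOf?, PySem.List.dedup_eq_ofList] at hk'
    simp [hk']
  · rw [List.getElem?_eq_none (by rw [pvOuter_len]; simpa using hi),
      List.getElem?_eq_none (by simpa using hi)]

-- ===== VERDICT =====
theorem obfuscate_once_spec : Claim_equal_obfuscate_once := by
  intro text _
  unfold Spec_obfuscate_once
  simp only [obfuscate_once, obfuscate_once_alt, pvFoldA_fst, pvFoldA_snd, List.nil_append]
  rw [pvAccC_eq_dedup]
  rw [show (PySem.List.enumerate text.toList 0).foldl
        (fun (d : PySem.Dict Char (List Int)) p => d.modify p.2 [] (· ++ [p.1])) PySem.Dict.empty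
      = pvPositions text.toList from rfl]
  rw [pvOut_eq_map, pvPositions_keys]
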